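-- pv_equiv track=rewrite | github.com/MULLICK-SWASTIK/ASSIGNMENTS_5th | Python3651/MA_3/Q23.py | IndexOfVowels
-- ===== SOURCE A (Python) =====
-- def IndexOfVowels(string):
--     IndexList = {
--         "a": [], "e": [], "i": [], "o": [], "u": [],
--         "A": [], "E": [], "I": [], "O": [], "U": []
--     }
--     for i in range(len(string)):
--         if string[i] in IndexList:
--             IndexList[string[i]].append(i)
--     return IndexList
-- ===== SOURCE B (Python) =====
-- def IndexOfVowels(string):
--     return {v: [i for i, c in enumerate(string) if c == v] for v in "aeiouAEIOU"}
-- ===== Notes on version B (the rewrite author's own statement) =====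
-- stated objective: simpler
-- what changed: Replaces the single left-to-right pass that appends into a pre-built ten-key dict with a one-line dict comprehension that scans the string once per vowel, computing each vowel's index list independently.
import Mathlib
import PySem

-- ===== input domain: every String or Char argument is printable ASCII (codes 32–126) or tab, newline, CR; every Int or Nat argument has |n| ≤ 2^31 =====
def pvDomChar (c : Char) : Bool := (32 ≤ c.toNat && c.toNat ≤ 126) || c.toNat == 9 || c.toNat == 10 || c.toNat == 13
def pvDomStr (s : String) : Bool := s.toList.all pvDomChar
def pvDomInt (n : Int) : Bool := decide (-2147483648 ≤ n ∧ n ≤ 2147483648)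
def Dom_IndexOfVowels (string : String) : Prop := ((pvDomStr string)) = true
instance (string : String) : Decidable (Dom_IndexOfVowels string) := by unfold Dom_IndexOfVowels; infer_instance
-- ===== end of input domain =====

-- B replaces A's single appending pass over a pre-built ten-key dict by a per-vowel
-- dict comprehension (one independent scan per vowel); objective: simpler.

-- ===== PORT A =====
-- the literal ten-key dict A builds first
def pvInit_IndexOfVowels : List (String × List Int) :=
  [("a", []), ("e", []), ("i", []), ("o", []), ("u", []),
   ("A", []), ("E", []), ("I", []), ("O", []), ("U", [])]

-- one iteration of A's loop body: `if string[i] in IndexList: IndexList[string[i]].append(i)`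
def pvStep_IndexOfVowels (cs : List Char) (d : List (String × List Int)) (i : Nat) :
    List (String × List Int) :=
  let c : String := String.ofList [cs.getD i ' ']   -- string[i]; i < len so getD never uses the default
  if (d.map (·.1)).contains c then
    d.map (fun p => if p.1 = c then (p.1, p.2 ++ [(i : Int)]) else p)
  else d

def IndexOfVowels (string : String) : List (String × List Int) :=
  (List.range string.toList.length).foldl (pvStep_IndexOfVowels string.toList)
    pvInit_IndexOfVowels

-- ===== PORT B =====
def IndexOfVowels_alt (string : String) : List (String × List Int) :=
  "aeiouAEIOU".toList.map (fun v =>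
    (String.ofList [v],
     (PySem.List.enumerate string.toList 0).filterMap
       (fun p => if p.2 = v then some p.1 else none)))

-- ===== PRECONDITION & SPEC =====
def Spec_IndexOfVowels (string : String) (out : List (String × List Int)) : Prop := out = IndexOfVowels_alt string
instance (string : String) (out : List (String × List Int)) : Decidable (Spec_IndexOfVowels string out) := by unfold Spec_IndexOfVowels; infer_instance

-- ===== CLAIM (what is proved, stated in full; the proofs are below) =====
def Claim_equal_IndexOfVowels : Prop := ∀ (string : String), Dom_IndexOfVowels string → Spec_IndexOfVowels string (IndexOfVowels string)

-- ===== LEMMAS AND PROOFS =====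

def pvVowels : List Char := "aeiouAEIOU".toList

def pvTarget (cs : List Char) : List (String × List Int) :=
  pvVowels.map (fun v =>
    (String.ofList [v],
     (PySem.List.enumerate cs 0).filterMap (fun p => if p.2 = v then some p.1 else none)))

lemma pvInit_eq : pvInit_IndexOfVowels = pvTarget [] := by decide

lemma pvOfList_single_inj {a b : Char} (h : String.ofList [a] = String.ofList [b]) : a = b := by
  have := congrArg String.toList h
  simpa using this

lemma pvStep_congr (ds : List Char) (c : Char) :
    (List.range ds.length).foldl (pvStep_IndexOfVowels (ds ++ [c])) pvInit_IndexOfVowels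
      = (List.range ds.length).foldl (pvStep_IndexOfVowels ds) pvInit_IndexOfVowels := by
  apply PySem.List.foldl_congr_mem
  intro acc i hi
  have hlt : i < ds.length := List.mem_range.mp hi
  have h : (ds ++ [c])[i]? = ds[i]? := List.getElem?_append_left hlt
  have hch : (ds ++ [c])[i]?.getD ' ' = ds[i]?.getD ' ' := by rw [h]
  unfold pvStep_IndexOfVowels
  simp only [List.getD, hch]
  rfl

lemma pvLoop_eq (cs : List Char) :
    (List.range cs.length).foldl (pvStep_IndexOfVowels cs) pvInit_IndexOfVowels
      = pvTarget cs := by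
  induction cs using List.reverseRecOn with
  | nil => exact pvInit_eq
  | append_singleton ds c ih =>
    rw [List.length_append, List.length_singleton, List.range_succ, List.foldl_concat,
        pvStep_congr, ih]
    -- now: one step on the target of ds equals the target of ds ++ [c]
    have hget : (ds ++ [c]).getD ds.length ' ' = c := by
      simp [List.getD]
    unfold pvStep_IndexOfVowels pvTarget
    simp only [hget]
    have henum : PySem.List.enumerate (ds ++ [c]) 0
        = PySem.List.enumerate ds 0 ++ [((ds.length : Int), c)] := by
      rw [PySem.List.enumerate_append]
      simp [PySem.List.enumerate]
    by_cases hc : c ∈ pvVowels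
    · have hmem : ((pvVowels.map (fun v =>
          (String.ofList [v],
           (PySem.List.enumerate ds 0).filterMap
             (fun p => if p.2 = v then some p.1 else none)))).map (·.1)).contains
            (String.ofList [c]) = true := by
        simp only [List.map_map, List.contains_eq_any_beq, List.any_eq_true]
        exact ⟨String.ofList [c], List.mem_map.mpr ⟨c, hc, rfl⟩, by simp⟩
      rw [if_pos hmem]
      rw [henum, List.map_map]
      apply List.map_congr_left
      intro v _
      simp only [Function.comp]
      by_cases hv : v = c
      · subst hv
        simp [List.filterMap_append]
      · have hne : String.ofList [v] ≠ String.ofList [c] := fun h =>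
          hv (pvOfList_single_inj h)
        simp [hne, Ne.symm hv, List.filterMap_append]
    · have hmem : ((pvVowels.map (fun v =>
          (String.ofList [v],
           (PySem.List.enumerate ds 0).filterMap
             (fun p => if p.2 = v then some p.1 else none)))).map (·.1)).contains
            (String.ofList [c]) = false := by
        simp only [List.map_map, List.contains_eq_any_beq, List.any_eq_false]
        intro s hs
        obtain ⟨v, hv, rfl⟩ := List.mem_map.mp hs
        simp only [Function.comp]
        intro hb
        exact hc ((pvOfList_single_inj (eq_of_beq hb)).symm ▸ hv)
      rw [if_neg (by simp only [hmem]; exact Bool.false_ne_true)]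
      rw [henum]
      apply List.map_congr_left
      intro v hv
      have hvc : v ≠ c := fun h => hc (h ▸ hv)
      simp [Ne.symm hvc, List.filterMap_append]

-- ===== VERDICT (by name: the statement is the Claim_ definition above) =====
theorem IndexOfVowels_spec : Claim_equal_IndexOfVowels := by
  intro s _
  unfold Spec_IndexOfVowels IndexOfVowels IndexOfVowels_alt
  rw [pvLoop_eq]
  rfl
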